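-- pv_equiv track=rewrite | github.com/hideaki-j/conference-statistics | src/make_table.py | split_citations_and_downloads
-- ===== SOURCE A (Python) =====
-- def split_citations_and_downloads(num_str, max_download=20000):
--     digits = num_str.replace(',', '')
--     if not digits or not digits.isdigit():
--         return None, None
--
--     candidates = []
--     max_download_len = min(5, len(digits))
--
--     for download_len in range(1, max_download_len + 1):
--         download_digits = digits[-download_len:]
--         citation_digits = digits[:-download_len]
--
--         if not citation_digits:
--             continue
--
--         if len(citation_digits) > 1 and citation_digits[0] == '0':
--             continue
--
--         download_val = int(download_digits)
--         if download_val > max_download: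
--             continue
--
--         formatted_download = f"{download_val:,}"
--         if citation_digits + formatted_download == num_str:
--             citation_val = int(citation_digits)
--             candidates.append((citation_val, download_val, download_len))
--
--     if not candidates:
--         return None, int(digits)
--
--     def prefer(cands, predicate):
--         filtered = [c for c in cands if predicate(c)]
--         return filtered if filtered else cands
--
--     candidates = prefer(candidates, lambda c: c[0] <= 500)
--     candidates = prefer(candidates, lambda c: c[1] >= 100)
--     candidates = prefer(candidates, lambda c: c[1] <= 10000)
--
--     candidates.sort(key=lambda c: (c[1], -c[0]))
--     citation_val, download_val, _ = candidates[0]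
--     return citation_val, download_val
-- ===== SOURCE B (Python) =====
-- def split_citations_and_downloads(num_str, max_download=20000):
--     digits = num_str.replace(',', '')
--     if not digits or not digits.isdigit():
--         return None, None
--
--     best = None  # (key, citation_val, download_val); keep first minimum
--     for download_len in range(1, min(5, len(digits)) + 1):
--         citation_digits = digits[:-download_len]
--         if not citation_digits:
--             continue
--         if len(citation_digits) > 1 and citation_digits[0] == '0':
--             continue
--         download_val = int(digits[-download_len:])
--         if download_val > max_download:
--             continue
--         if citation_digits + f"{download_val:,}" != num_str:
--             continue
--         citation_val = int(citation_digits)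
--         key = (citation_val > 500, download_val < 100, download_val > 10000,
--                download_val, -citation_val)
--         if best is None or key < best[0]:
--             best = (key, citation_val, download_val)
--
--     if best is None:
--         return None, int(digits)
--     return best[1], best[2]
-- ===== Notes on version B (the rewrite author's own statement) =====
-- stated objective: alternative
-- what changed: A collects all candidates in a list, runs three cascading prefer/filter passes and a stable sort, then takes the first element; B keeps a single running best during the one generation pass, compared by the composite key (citation>500, download<100, download>10000, download, -citation), so the list, the three filter passes and the sort disappear.
import Mathlib
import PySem

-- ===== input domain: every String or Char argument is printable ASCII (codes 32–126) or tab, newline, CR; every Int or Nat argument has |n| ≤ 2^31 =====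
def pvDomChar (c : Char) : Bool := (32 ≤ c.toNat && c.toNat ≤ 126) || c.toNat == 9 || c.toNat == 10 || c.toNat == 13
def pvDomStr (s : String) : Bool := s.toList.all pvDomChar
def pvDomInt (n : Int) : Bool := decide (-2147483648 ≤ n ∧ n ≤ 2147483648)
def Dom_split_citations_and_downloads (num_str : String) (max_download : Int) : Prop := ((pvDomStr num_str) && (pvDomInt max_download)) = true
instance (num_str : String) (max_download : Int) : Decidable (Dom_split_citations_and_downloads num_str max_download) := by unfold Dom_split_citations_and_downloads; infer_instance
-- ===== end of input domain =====

-- B replaces A's candidate list + three `prefer` filter passes + stable sort by a single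
-- running-best pass keyed on one composite key (objective: alternative, same cost).

-- Shared helper: f"{n:,}" (comma thousands grouping); exact for n ≥ 0, the only values
-- reached here (n is int() of a digit string).
def pyCommaGroup (cs : List Char) : List Char :=
  if cs.length ≤ 3 then cs
  else cs.take 3 ++ ',' :: pyCommaGroup (cs.drop 3)
termination_by cs.length
decreasing_by simp; omega

def pyCommaFmt (n : Int) : List Char :=
  (pyCommaGroup (PySem.Int.toChars n).reverse).reverse

-- ===== PORT A =====
-- the body of A's `for download_len in range(...)` loop, appending to `candidates`
def pvBodyA (digits num : List Char) (max_download : Int)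
    (acc : List (Int × Int × Int)) (download_len : Int) : List (Int × Int × Int) :=
  let download_digits := PySem.List.slice digits (some (-download_len)) none
  let citation_digits := PySem.List.slice digits none (some (-download_len))
  if citation_digits = [] then acc
  else if decide (1 < citation_digits.length) && (PySem.List.pyGetD citation_digits 0 ' ' == '0') then acc
  else
    -- int() on a nonempty digit string: never raises, so .getD 0 is exact
    let download_val := (PySem.Int.ofChars? download_digits).getD 0
    if max_download < download_val then acc
    else
      let formatted_download := pyCommaFmt download_val
      if citation_digits ++ formatted_download = num then
        acc ++ [((PySem.Int.ofChars? citation_digits).getD 0, download_val, download_len)]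
      else acc

-- A's local helper `prefer`
def pvPrefer (cands : List (Int × Int × Int)) (p : Int × Int × Int → Bool) : List (Int × Int × Int) :=
  let filtered := cands.filter p
  if filtered = [] then cands else filtered

def split_citations_and_downloads (num_str : String) (max_download : Int) : Option Int × Option Int :=
  let digits : List Char := (PySem.Str.replace num_str "," "").toList
  if digits = [] || !PySem.Chars.strIsdigit digits then (none, none)
  else
    let max_download_len : Int := min 5 (digits.length : Int)
    let candidates :=
      (PySem.List.pyRange 1 (max_download_len + 1) 1).foldl
        (pvBodyA digits num_str.toList max_download) []
    if candidates = [] then (none, some ((PySem.Int.ofChars? digits).getD 0))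
    else
      let c1 := pvPrefer candidates (fun c => decide (c.1 ≤ 500))
      let c2 := pvPrefer c1 (fun c => decide (100 ≤ c.2.1))
      let c3 := pvPrefer c2 (fun c => decide (c.2.1 ≤ 10000))
      match PySem.List.sorted2 c3 (fun c => c.2.1) (fun c => -c.1) false with
      | (citation_val, download_val, _) :: _ => (some citation_val, some download_val)
      | [] => (none, none)  -- unreachable: c3 is nonempty

-- ===== PORT B =====
-- Python tuple `<` on B's composite key (bool components: False < True)
def pvBoolLt (a b : Bool) : Bool := !a && b
def pvKeyLt (k k' : Bool × Bool × Bool × Int × Int) : Bool :=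
  pvBoolLt k.1 k'.1 || (k.1 == k'.1 && (pvBoolLt k.2.1 k'.2.1 || (k.2.1 == k'.2.1 &&
    (pvBoolLt k.2.2.1 k'.2.2.1 || (k.2.2.1 == k'.2.2.1 &&
      (decide (k.2.2.2.1 < k'.2.2.2.1) || (k.2.2.2.1 == k'.2.2.2.1 && decide (k.2.2.2.2 < k'.2.2.2.2))))))))

def pvKeyOf (citation_val download_val : Int) : Bool × Bool × Bool × Int × Int :=
  (decide (500 < citation_val), decide (download_val < 100), decide (10000 < download_val),
   download_val, -citation_val)

-- the body of B's loop, updating the running best (key, citation_val, download_val)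
def pvBodyB (digits num : List Char) (max_download : Int)
    (b : Option ((Bool × Bool × Bool × Int × Int) × Int × Int)) (download_len : Int) :
    Option ((Bool × Bool × Bool × Int × Int) × Int × Int) :=
  let citation_digits := PySem.List.slice digits none (some (-download_len))
  if citation_digits = [] then b
  else if decide (1 < citation_digits.length) && (PySem.List.pyGetD citation_digits 0 ' ' == '0') then b
  else
    -- int() on a nonempty digit string: never raises, so .getD 0 is exact
    let download_val := (PySem.Int.ofChars? (PySem.List.slice digits (some (-download_len)) none)).getD 0
    if max_download < download_val then b
    else if citation_digits ++ pyCommaFmt download_val = num then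
      let citation_val := (PySem.Int.ofChars? citation_digits).getD 0
      let k := pvKeyOf citation_val download_val
      match b with
      | none => some (k, citation_val, download_val)
      | some (k0, p) => if pvKeyLt k k0 then some (k, citation_val, download_val) else some (k0, p)
    else b

def split_citations_and_downloads_alt (num_str : String) (max_download : Int) : Option Int × Option Int :=
  let digits : List Char := (PySem.Str.replace num_str "," "").toList
  if digits = [] || !PySem.Chars.strIsdigit digits then (none, none)
  else
    let best :=
      (PySem.List.pyRange 1 (min 5 (digits.length : Int) + 1) 1).foldl
        (pvBodyB digits num_str.toList max_download) none
    match best with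
    | none => (none, some ((PySem.Int.ofChars? digits).getD 0))
    | some (_, citation_val, download_val) => (some citation_val, some download_val)

-- ===== PRECONDITION & SPEC =====
def Spec_split_citations_and_downloads (num_str : String) (max_download : Int) (out : Option Int × Option Int) : Prop := out = split_citations_and_downloads_alt num_str max_download
instance (num_str : String) (max_download : Int) (out : Option Int × Option Int) : Decidable (Spec_split_citations_and_downloads num_str max_download out) := by unfold Spec_split_citations_and_downloads; infer_instance

-- ===== CLAIM (what is proved, stated in full; the proofs are below) =====
def Claim_equal_split_citations_and_downloads : Prop := ∀ (num_str : String) (max_download : Int), Dom_split_citations_and_downloads num_str max_download → Spec_split_citations_and_downloads num_str max_download (split_citations_and_downloads num_str max_download)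

-- ===== LEMMAS AND PROOFS =====

-- the candidate produced at a given download_len (none = this iteration `continue`s)
def pvCandAt (digits num : List Char) (max_download download_len : Int) : Option (Int × Int × Int) :=
  let citation_digits := PySem.List.slice digits none (some (-download_len))
  if citation_digits = [] then none
  else if decide (1 < citation_digits.length) && (PySem.List.pyGetD citation_digits 0 ' ' == '0') then none
  else
    let download_val := (PySem.Int.ofChars? (PySem.List.slice digits (some (-download_len)) none)).getD 0
    if max_download < download_val then none
    else if citation_digits ++ pyCommaFmt download_val = num then
      some ((PySem.Int.ofChars? citation_digits).getD 0, download_val, download_len)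
    else none

def pvKey (c : Int × Int × Int) : Bool × Bool × Bool × Int × Int := pvKeyOf c.1 c.2.1

def pvUpd (b : Option ((Bool × Bool × Bool × Int × Int) × Int × Int)) (c : Int × Int × Int) :
    Option ((Bool × Bool × Bool × Int × Int) × Int × Int) :=
  match b with
  | none => some (pvKey c, c.1, c.2.1)
  | some (k0, p) => if pvKeyLt (pvKey c) k0 then some (pvKey c, c.1, c.2.1) else some (k0, p)

lemma pvBodyA_eq (digits num : List Char) (m : Int) (acc : List (Int × Int × Int)) (L : Int) :
    pvBodyA digits num m acc L = acc ++ (pvCandAt digits num m L).toList := by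
  unfold pvBodyA pvCandAt
  dsimp only
  split_ifs <;> simp

lemma pvBodyB_eq (digits num : List Char) (m : Int)
    (b : Option ((Bool × Bool × Bool × Int × Int) × Int × Int)) (L : Int) :
    pvBodyB digits num m b L =
      match pvCandAt digits num m L with
      | none => b
      | some c => pvUpd b c := by
  unfold pvBodyB pvCandAt pvUpd pvKey
  dsimp only
  split_ifs <;> rfl

lemma pvFoldA (digits num : List Char) (m : Int) (r : List Int) (acc : List (Int × Int × Int)) :
    r.foldl (pvBodyA digits num m) acc = acc ++ r.filterMap (pvCandAt digits num m) := by
  induction r generalizing acc with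
  | nil => simp
  | cons L r ih =>
      simp only [List.foldl_cons, List.filterMap_cons, pvBodyA_eq]
      cases h : pvCandAt digits num m L <;> simp [ih]

lemma pvFoldB (digits num : List Char) (m : Int) (r : List Int)
    (b : Option ((Bool × Bool × Bool × Int × Int) × Int × Int)) :
    r.foldl (pvBodyB digits num m) b = (r.filterMap (pvCandAt digits num m)).foldl pvUpd b := by
  induction r generalizing b with
  | nil => simp
  | cons L r ih =>
      simp only [List.foldl_cons, List.filterMap_cons, pvBodyB_eq]
      cases h : pvCandAt digits num m L <;> simp [ih]

-- ----- order facts about pvKeyLt -----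

lemma pvKeyLt_irrefl (k : Bool × Bool × Bool × Int × Int) : pvKeyLt k k = false := by
  obtain ⟨a, b, c, d, e⟩ := k
  simp [pvKeyLt, pvBoolLt]

lemma pvKeyLt_trans {a b c : Bool × Bool × Bool × Int × Int}
    (h1 : pvKeyLt a b = true) (h2 : pvKeyLt b c = true) : pvKeyLt a c = true := by
  obtain ⟨a1, a2, a3, a4, a5⟩ := a
  obtain ⟨b1, b2, b3, b4, b5⟩ := b
  obtain ⟨c1, c2, c3, c4, c5⟩ := c
  cases a1 <;> cases a2 <;> cases a3 <;> cases b1 <;> cases b2 <;> cases b3 <;>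
    cases c1 <;> cases c2 <;> cases c3 <;>
    simp_all [pvKeyLt, pvBoolLt] <;> omega

-- Python `tuple <` pieces used in the assembly
lemma pvKeyLt_bit1 {a b : Bool × Bool × Bool × Int × Int}
    (h1 : a.1 = false) (h2 : b.1 = true) : pvKeyLt a b = true := by
  simp [pvKeyLt, pvBoolLt, h1, h2]

lemma pvKeyLt_bit2 {a b : Bool × Bool × Bool × Int × Int}
    (h0 : a.1 = b.1) (h1 : a.2.1 = false) (h2 : b.2.1 = true) : pvKeyLt a b = true := by
  cases hb : b.1 <;> simp [pvKeyLt, pvBoolLt, h0, h1, h2, hb]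

lemma pvKeyLt_bit3 {a b : Bool × Bool × Bool × Int × Int}
    (h0 : a.1 = b.1) (h1 : a.2.1 = b.2.1) (h2 : a.2.2.1 = false) (h3 : b.2.2.1 = true) :
    pvKeyLt a b = true := by
  cases hb : b.1 <;> cases hb2 : b.2.1 <;> simp [pvKeyLt, pvBoolLt, h0, h1, h2, h3, hb, hb2]

lemma pvKeyLt_tail_iff {a b : Bool × Bool × Bool × Int × Int}
    (h0 : a.1 = b.1) (h1 : a.2.1 = b.2.1) (h2 : a.2.2.1 = b.2.2.1) :
    pvKeyLt a b = true ↔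
      (a.2.2.2.1 < b.2.2.2.1 ∨ (a.2.2.2.1 = b.2.2.2.1 ∧ a.2.2.2.2 < b.2.2.2.2)) := by
  cases hb : b.1 <;> cases hb2 : b.2.1 <;> cases hb3 : b.2.2.1 <;>
    simp [pvKeyLt, pvBoolLt, h0, h1, h2, hb, hb2, hb3]

-- ----- B's fold computes a first minimum by pvKey -----

def pvMinState (l : List (Int × Int × Int))
    (b : Option ((Bool × Bool × Bool × Int × Int) × Int × Int)) : Prop :=
  match b with
  | none => l = []
  | some (k, cv, dv) =>
      (∃ c ∈ l, pvKey c = k ∧ c.1 = cv ∧ c.2.1 = dv) ∧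
      ∀ c ∈ l, pvKeyLt (pvKey c) k = false

lemma pvMinState_step {l0 : List (Int × Int × Int)} {b} (h : pvMinState l0 b)
    (c : Int × Int × Int) : pvMinState (l0 ++ [c]) (pvUpd b c) := by
  cases b with
  | none =>
      simp only [pvMinState] at h
      subst h
      refine ⟨⟨c, by simp, rfl, rfl, rfl⟩, ?_⟩
      intro x hx
      simp at hx
      subst hx
      exact pvKeyLt_irrefl _
  | some kp =>
      obtain ⟨k0, p⟩ := kp
      obtain ⟨⟨w, hw, hwk, hw1, hw2⟩, hmin⟩ := h
      simp only [pvUpd]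
      by_cases hlt : pvKeyLt (pvKey c) k0 = true
      · simp only [hlt, if_true]
        refine ⟨⟨c, by simp, rfl, rfl, rfl⟩, ?_⟩
        intro x hx
        rcases List.mem_append.mp hx with hx | hx
        · by_contra hxc
          have hxc' : pvKeyLt (pvKey x) (pvKey c) = true := by
            cases hxx : pvKeyLt (pvKey x) (pvKey c) with
            | true => rfl
            | false => exact absurd hxx hxc
          have := pvKeyLt_trans hxc' hlt
          have := hmin x hx
          simp_all
        · simp at hx
          subst hx
          exact pvKeyLt_irrefl _
      · have hlt' : pvKeyLt (pvKey c) k0 = false := by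
          cases hxx : pvKeyLt (pvKey c) k0 with
          | true => exact absurd hxx hlt
          | false => rfl
        simp only [hlt', Bool.false_eq_true, if_false]
        refine ⟨⟨w, by simp [hw], hwk, hw1, hw2⟩, ?_⟩
        intro x hx
        rcases List.mem_append.mp hx with hx | hx
        · exact hmin x hx
        · simp at hx; subst hx; exact hlt'

lemma pvFold_minState (l : List (Int × Int × Int)) :
    pvMinState l (l.foldl pvUpd none) := by
  suffices h : ∀ (l l0 : List (Int × Int × Int)) (b), pvMinState l0 b →
      pvMinState (l0 ++ l) (l.foldl pvUpd b) by
    have := h l [] none (by simp [pvMinState])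
    simpa using this
  intro l
  induction l with
  | nil => intro l0 b h; simpa using h
  | cons c l ih =>
      intro l0 b h
      have := ih (l0 ++ [c]) (pvUpd b c) (pvMinState_step h c)
      simpa using this

-- ----- A's prefer cascade and stable sort -----

lemma mem_pvPrefer {l : List (Int × Int × Int)} {p : Int × Int × Int → Bool}
    {x : Int × Int × Int} :
    x ∈ pvPrefer l p ↔ x ∈ l ∧ (p x = true ∨ ∀ y ∈ l, p y = false) := by
  unfold pvPrefer
  dsimp only
  by_cases h : l.filter p = []
  · have hall : ∀ y ∈ l, p y = false := by
      intro y hy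
      have := List.filter_eq_nil_iff.mp h y hy
      simpa using this
    simp only [h, if_true]
    constructor
    · intro hx; exact ⟨hx, Or.inr hall⟩
    · intro hx; exact hx.1
  · simp only [h, if_false, List.mem_filter]
    constructor
    · intro hx; exact ⟨hx.1, Or.inl hx.2⟩
    · rintro ⟨hx, hp | hall⟩
      · exact ⟨hx, hp⟩
      · exact absurd (List.filter_eq_nil_iff.mpr (fun y hy => by simp [hall y hy])) h

lemma pvPrefer_ne_nil {l : List (Int × Int × Int)} {p : Int × Int × Int → Bool}
    (h : l ≠ []) : pvPrefer l p ≠ [] := by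
  unfold pvPrefer
  dsimp only
  split_ifs with hf
  · exact h
  · exact hf

lemma pvPrefer_uniform {l : List (Int × Int × Int)} {p : Int × Int × Int → Bool}
    {x y : Int × Int × Int} (hx : x ∈ pvPrefer l p) (hy : y ∈ pvPrefer l p) :
    p x = p y := by
  rw [mem_pvPrefer] at hx hy
  rcases hx.2 with hpx | hall
  · rcases hy.2 with hpy | hall
    · rw [hpx, hpy]
    · rw [hall x hx.1] at hpx; cases hpx
  · rw [hall x hx.1, hall y hy.1]

-- head of an insertion sort is minimal for the `before` relation
def pvHeadMin {α : Type} (before : α → α → Bool) (xs : List α) : Prop :=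
  ∀ m t, xs = m :: t → ∀ y ∈ xs, before y m = false

lemma pvInsertBy_headMin {α : Type} (before : α → α → Bool)
    (hirr : ∀ a, before a a = false)
    (htr : ∀ a b c, before a b = true → before b c = true → before a c = true)
    (x : α) (acc : List α) (h : pvHeadMin before acc) :
    pvHeadMin before (PySem.List.insertBy before x acc) := by
  cases acc with
  | nil =>
      intro m t hmt y hy
      simp [PySem.List.insertBy] at hmt hy
      rw [hy, hmt.1, hirr]
  | cons a as =>
      by_cases hxa : before x a = true
      · intro m t hmt y hy
        simp only [PySem.List.insertBy, hxa, if_true] at hmt hy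
        have hm : x = m := (List.cons.inj hmt).1
        rw [← hm]
        rcases List.mem_cons.mp hy with rfl | hy
        · exact hirr _
        · by_contra hc
          have hc' : before y x = true := by
            cases hyy : before y x with
            | true => rfl
            | false => exact absurd hyy hc
          have hya := htr _ _ _ hc' hxa
          have := h a as rfl y hy
          simp_all
      · have hxa' : before x a = false := by
          cases hxx : before x a with
          | true => exact absurd hxx hxa
          | false => rfl
        intro m t hmt y hy
        simp only [PySem.List.insertBy, hxa', Bool.false_eq_true, if_false] at hmt hy
        have hm : a = m := (List.cons.inj hmt).1
        rw [← hm]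
        rcases List.mem_cons.mp hy with rfl | hy
        · exact hirr _
        · rcases (PySem.List.mem_insertBy _ _ _ _).mp hy with rfl | hy
          -- y = x or y ∈ as
          · exact hxa'
          · exact h a as rfl y (by simp [hy])

lemma pvSortFold_headMin {α : Type} (before : α → α → Bool)
    (hirr : ∀ a, before a a = false)
    (htr : ∀ a b c, before a b = true → before b c = true → before a c = true)
    (l : List α) :
    pvHeadMin before (l.foldl (fun acc x => PySem.List.insertBy before x acc) []) := by
  suffices h : ∀ (l acc : List α), pvHeadMin before acc →
      pvHeadMin before (l.foldl (fun acc x => PySem.List.insertBy before x acc) acc) by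
    exact h l [] (by intro m t hmt; simp at hmt)
  intro l
  induction l with
  | nil => intro acc h; simpa using h
  | cons x l ih =>
      intro acc h
      exact ih _ (pvInsertBy_headMin before hirr htr x acc h)

lemma pvFoldA0 (digits num : List Char) (m : Int) (r : List Int) :
    r.foldl (pvBodyA digits num m) [] = r.filterMap (pvCandAt digits num m) := by
  rw [pvFoldA, List.nil_append]

-- A's prefer cascade + stable sort picks the same (citation, download) pair as B's single
-- running minimum over the composite key
lemma pvSelect_eq (l : List (Int × Int × Int)) (k : Bool × Bool × Bool × Int × Int) (cv dv : Int)
    (hfold : l.foldl pvUpd none = some (k, cv, dv)) :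
    ∃ (mL : Int) (t : List (Int × Int × Int)),
      PySem.List.sorted2
        (pvPrefer (pvPrefer (pvPrefer l (fun c => decide (c.1 ≤ 500)))
            (fun c => decide (100 ≤ c.2.1))) (fun c => decide (c.2.1 ≤ 10000)))
        (fun c => c.2.1) (fun c => -c.1) false = (cv, dv, mL) :: t := by
  have hms := pvFold_minState l
  rw [hfold] at hms
  simp only [pvMinState] at hms
  obtain ⟨⟨c, hcl, hck, hc1, hc2⟩, hmin⟩ := hms
  rw [← hck] at hmin
  have hlne : l ≠ [] := by
    intro h; rw [h] at hfold; simp at hfold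
  set s1 := pvPrefer l (fun c => decide (c.1 ≤ 500)) with hs1
  set s2 := pvPrefer s1 (fun c => decide (100 ≤ c.2.1)) with hs2
  set s3 := pvPrefer s2 (fun c => decide (c.2.1 ≤ 10000)) with hs3
  have hsub1 : ∀ x ∈ s1, x ∈ l := fun x hx => (mem_pvPrefer.mp hx).1
  have hsub2 : ∀ x ∈ s2, x ∈ s1 := fun x hx => (mem_pvPrefer.mp hx).1
  have hsub3 : ∀ x ∈ s3, x ∈ s2 := fun x hx => (mem_pvPrefer.mp hx).1
  have hs3ne : s3 ≠ [] := pvPrefer_ne_nil (pvPrefer_ne_nil (pvPrefer_ne_nil hlne))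
  -- key bits are uniform across the prefer stages
  have key1_eq : ∀ x ∈ s1, ∀ y ∈ s1, (pvKey x).1 = (pvKey y).1 := by
    intro x hx y hy
    have h := pvPrefer_uniform hx hy
    simp only [pvKey, pvKeyOf]
    by_cases hxx : x.1 ≤ 500 <;> by_cases hyy : y.1 ≤ 500 <;>
      simp [hxx, hyy] at h ⊢ <;> omega
  have key2_eq : ∀ x ∈ s2, ∀ y ∈ s2, (pvKey x).2.1 = (pvKey y).2.1 := by
    intro x hx y hy
    have h := pvPrefer_uniform hx hy
    simp only [pvKey, pvKeyOf]
    by_cases hxx : 100 ≤ x.2.1 <;> by_cases hyy : 100 ≤ y.2.1 <;>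
      simp [hxx, hyy] at h ⊢ <;> omega
  have key3_eq : ∀ x ∈ s3, ∀ y ∈ s3, (pvKey x).2.2.1 = (pvKey y).2.2.1 := by
    intro x hx y hy
    have h := pvPrefer_uniform hx hy
    simp only [pvKey, pvKeyOf]
    by_cases hxx : x.2.1 ≤ 10000 <;> by_cases hyy : y.2.1 ≤ 10000 <;>
      simp [hxx, hyy] at h ⊢ <;> omega
  -- the overall-minimum candidate c survives every prefer stage
  have hc_s1 : c ∈ s1 := by
    rw [hs1, mem_pvPrefer]
    refine ⟨hcl, ?_⟩
    by_cases hp : c.1 ≤ 500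
    · exact Or.inl (by simpa using hp)
    · refine Or.inr fun y hy => ?_
      by_contra hpy
      have hpy' : y.1 ≤ 500 := by revert hpy; simp
      have hk : pvKeyLt (pvKey y) (pvKey c) = true :=
        pvKeyLt_bit1 (by simp [pvKey, pvKeyOf]; omega) (by simp [pvKey, pvKeyOf]; omega)
      rw [hmin y hy] at hk; cases hk
  have hc_s2 : c ∈ s2 := by
    rw [hs2, mem_pvPrefer]
    refine ⟨hc_s1, ?_⟩
    by_cases hp : 100 ≤ c.2.1
    · exact Or.inl (by simpa using hp)
    · refine Or.inr fun y hy => ?_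
      by_contra hpy
      have hpy' : 100 ≤ y.2.1 := by revert hpy; simp
      have hk : pvKeyLt (pvKey y) (pvKey c) = true :=
        pvKeyLt_bit2 (key1_eq y hy c hc_s1)
          (by simp [pvKey, pvKeyOf]; omega) (by simp [pvKey, pvKeyOf]; omega)
      rw [hmin y (hsub1 y hy)] at hk; cases hk
  have hc_s3 : c ∈ s3 := by
    rw [hs3, mem_pvPrefer]
    refine ⟨hc_s2, ?_⟩
    by_cases hp : c.2.1 ≤ 10000
    · exact Or.inl (by simpa using hp)
    · refine Or.inr fun y hy => ?_
      by_contra hpy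
      have hpy' : y.2.1 ≤ 10000 := by revert hpy; simp
      have hk : pvKeyLt (pvKey y) (pvKey c) = true :=
        pvKeyLt_bit3 (key1_eq y (hsub2 y hy) c hc_s1) (key2_eq y hy c hc_s2)
          (by simp [pvKey, pvKeyOf]; omega) (by simp [pvKey, pvKeyOf]; omega)
      rw [hmin y (hsub1 y (hsub2 y hy))] at hk; cases hk
  -- head of the stable sort is minimal for the sort's comparison
  have hirr : ∀ a : Int × Int × Int,
      (decide (a.2.1 < a.2.1) || (!decide (a.2.1 < a.2.1) && decide (-a.1 < -a.1))) = false := by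
    intro a; simp
  have htr : ∀ a b c : Int × Int × Int,
      (decide (a.2.1 < b.2.1) || (!decide (b.2.1 < a.2.1) && decide (-a.1 < -b.1))) = true →
      (decide (b.2.1 < c.2.1) || (!decide (c.2.1 < b.2.1) && decide (-b.1 < -c.1))) = true →
      (decide (a.2.1 < c.2.1) || (!decide (c.2.1 < a.2.1) && decide (-a.1 < -c.1))) = true := by
    intro a b c h1 h2
    simp only [Bool.or_eq_true, Bool.and_eq_true, Bool.not_eq_eq_eq_not, Bool.not_true,
      decide_eq_true_eq, decide_eq_false_iff_not] at h1 h2 ⊢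
    omega
  have hsort := pvSortFold_headMin
    (fun a b : Int × Int × Int =>
      decide (a.2.1 < b.2.1) || (!decide (b.2.1 < a.2.1) && decide (-a.1 < -b.1)))
    hirr htr s3
  have hseq : PySem.List.sorted2 s3 (fun c => c.2.1) (fun c => -c.1) false =
      s3.foldl (fun acc x => PySem.List.insertBy
        (fun a b : Int × Int × Int =>
          decide (a.2.1 < b.2.1) || (!decide (b.2.1 < a.2.1) && decide (-a.1 < -b.1))) x acc) [] := rfl
  rw [← hseq] at hsort
  have hperm := PySem.List.sorted2_perm s3 (fun c => c.2.1) (fun c => -c.1) false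
  cases hsrt : PySem.List.sorted2 s3 (fun c => c.2.1) (fun c => -c.1) false with
  | nil =>
      rw [hsrt] at hperm
      exact absurd (List.Perm.eq_nil hperm.symm) hs3ne
  | cons m t =>
      rw [hsrt] at hperm
      have hm_mem : m ∈ s3 := hperm.subset (List.mem_cons_self)
      have hmin2 : ∀ y ∈ s3,
          (decide (y.2.1 < m.2.1) || (!decide (m.2.1 < y.2.1) && decide (-y.1 < -m.1))) = false := by
        intro y hy
        have hy' : y ∈ m :: t := (hperm.mem_iff).mpr hy
        rw [← hsrt] at hy'
        exact hsort m t hsrt y hy'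
      -- both m and c are in s3, so their key bits agree
      have hb1 : (pvKey m).1 = (pvKey c).1 :=
        key1_eq m (hsub2 m (hsub3 m hm_mem)) c hc_s1
      have hb2 : (pvKey m).2.1 = (pvKey c).2.1 := key2_eq m (hsub3 m hm_mem) c hc_s2
      have hb3 : (pvKey m).2.2.1 = (pvKey c).2.2.1 := key3_eq m hm_mem c hc_s3
      have hA := hmin2 c hc_s3
      have hB := hmin m (hsub1 m (hsub2 m (hsub3 m hm_mem)))
      have hnP : ¬ ((pvKey m).2.2.2.1 < (pvKey c).2.2.2.1 ∨
          ((pvKey m).2.2.2.1 = (pvKey c).2.2.2.1 ∧ (pvKey m).2.2.2.2 < (pvKey c).2.2.2.2)) :=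
        fun hP => absurd ((pvKeyLt_tail_iff hb1 hb2 hb3).mpr hP) (by simp [hB])
      simp only [pvKey, pvKeyOf] at hnP
      simp only [Bool.or_eq_false_iff, Bool.and_eq_false_iff, Bool.not_eq_eq_eq_not,
        Bool.not_false, decide_eq_false_iff_not, decide_eq_true_eq] at hA
      have hm2 : m.2.1 = c.2.1 ∧ m.1 = c.1 := by
        rcases hA with ⟨h1, h2⟩
        rcases h2 with h2 | h2 <;> omega
      obtain ⟨hdv, hcv⟩ := hm2
      refine ⟨m.2.2, t, ?_⟩
      have hmeq : m = (cv, dv, m.2.2) := by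
        rw [← hc1, ← hc2, ← hdv, ← hcv]
      rw [← hmeq]

-- ===== VERDICT (by name: the statement is the Claim_ definition above) =====
set_option maxHeartbeats 1000000 in
theorem split_citations_and_downloads_spec : Claim_equal_split_citations_and_downloads := by
  intro num_str max_download _
  unfold Spec_split_citations_and_downloads
  simp only [split_citations_and_downloads, split_citations_and_downloads_alt]
  by_cases h0 : (decide ((PySem.Str.replace num_str "," "").toList = []) ||
      !PySem.Chars.strIsdigit (PySem.Str.replace num_str "," "").toList) = true
  · rw [if_pos h0, if_pos h0]
  · rw [if_neg h0, if_neg h0, pvFoldA0, pvFoldB]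
    set Lc := (PySem.List.pyRange 1 (min 5 ((PySem.Str.replace num_str "," "").toList.length : Int) + 1) 1).filterMap
        (pvCandAt (PySem.Str.replace num_str "," "").toList num_str.toList max_download) with hLc
    clear_value Lc
    by_cases hc : Lc = []
    · rw [hc, if_pos rfl]
      simp only [List.foldl_nil]
    · rw [if_neg hc]
      cases hb : Lc.foldl pvUpd none with
      | none =>
          have h := pvFold_minState Lc
          rw [hb] at h
          simp only [pvMinState] at h
          exact absurd h hc
      | some kp =>
          obtain ⟨k, cv, dv⟩ := kp
          obtain ⟨mL, t, hss⟩ := pvSelect_eq _ k cv dv hb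
          rw [hss]
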